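-- pv_equiv track=rewrite | github.com/lagerdata/lager | box/lager/debug/probes.py | compute_slot
-- ===== SOURCE A (Python) =====
-- def compute_slot(serial, all_serials):
--     """Deterministic slot 0..MAX_SLOTS-1 for *serial*.
--
--     Slots are assigned by sorted order of *all_serials* so they survive service
--     restarts. Returns 0 when *serial* is None or not present (legacy path).
--     """
--     if serial is None:
--         return 0
--     sorted_serials = sorted(s for s in all_serials if s)
--     try:
--         return sorted_serials.index(serial)
--     except ValueError:
--         return 0
-- ===== SOURCE B (Python) =====
-- def compute_slot(serial, all_serials):
--     """Single pass: the slot of a truthy, present serial is the number of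
--     truthy serials strictly smaller than it (= its index in the sorted
--     filtered list); otherwise 0."""
--     if not serial or serial not in all_serials:
--         return 0
--     n = 0
--     for s in all_serials:
--         if s and s < serial:
--             n += 1
--     return n
-- ===== Notes on version B (the rewrite author's own statement) =====
-- stated objective: faster
-- what changed: Instead of sorting the filtered serials and calling .index, B makes one pass counting truthy serials strictly smaller than the target (after a membership check), which is the target's index in the sorted list.
import Mathlib
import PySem

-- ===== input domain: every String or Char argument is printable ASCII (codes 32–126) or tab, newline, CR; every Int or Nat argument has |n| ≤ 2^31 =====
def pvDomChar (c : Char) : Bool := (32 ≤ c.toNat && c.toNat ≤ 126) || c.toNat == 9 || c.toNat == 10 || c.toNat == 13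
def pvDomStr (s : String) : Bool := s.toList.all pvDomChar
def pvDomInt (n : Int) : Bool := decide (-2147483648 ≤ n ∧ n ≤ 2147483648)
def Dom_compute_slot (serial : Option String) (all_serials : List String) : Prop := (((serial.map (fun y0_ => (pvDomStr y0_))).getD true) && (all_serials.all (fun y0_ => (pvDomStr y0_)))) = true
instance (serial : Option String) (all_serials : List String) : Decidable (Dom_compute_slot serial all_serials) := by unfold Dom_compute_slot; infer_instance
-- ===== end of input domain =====

-- B replaces sort + .index by one counting pass (index in sorted order = number of smaller truthy serials); return value only.

-- ===== PORT A =====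
def compute_slot (serial : Option String) (all_serials : List String) : Int :=
  match serial with
  | none => 0
  | some s =>
    let sorted_serials := PySem.List.sorted (all_serials.filter (fun x => x ≠ "")) (fun x => x) false
    match PySem.List.index? sorted_serials s with
    | some i => (i : Int)       -- sorted_serials.index(serial)
    | none => 0                 -- except ValueError: return 0

-- ===== PORT B =====
def compute_slot_alt (serial : Option String) (all_serials : List String) : Int :=
  match serial with
  | none => 0                   -- 'not serial' (None)
  | some s =>
    if s = "" ∨ s ∉ all_serials then 0   -- 'not serial' (empty) or 'serial not in all_serials'
    else all_serials.foldl (fun n x => if x ≠ "" ∧ x < s then n + 1 else n) (0 : Int)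

-- ===== PRECONDITION & SPEC =====
def Spec_compute_slot (serial : Option String) (all_serials : List String) (out : Int) : Prop := out = compute_slot_alt serial all_serials
instance (serial : Option String) (all_serials : List String) (out : Int) : Decidable (Spec_compute_slot serial all_serials out) := by unfold Spec_compute_slot; infer_instance

-- ===== CLAIM (what is proved, stated in full; the proofs are below) =====
def Claim_equal_compute_slot : Prop := ∀ (serial : Option String) (all_serials : List String), Dom_compute_slot serial all_serials → Spec_compute_slot serial all_serials (compute_slot serial all_serials)

-- ===== LEMMAS AND PROOFS =====

-- In a list sorted by ≤, the index of a member equals the count of strictly smaller elements.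
lemma index?_sorted_eq_countP {l : List String} {s : String}
    (hp : l.Pairwise (· ≤ ·)) (hm : s ∈ l) :
    PySem.List.index? l s = some (l.countP (fun x => decide (x < s))) := by
  induction l with
  | nil => cases hm
  | cons h t ih =>
    rcases List.pairwise_cons.mp hp with ⟨hle, hpt⟩
    by_cases hhs : h = s
    · subst hhs
      rw [PySem.List.index?_cons_self h t]
      have : (h :: t).countP (fun x => decide (x < h)) = 0 := by
        rw [List.countP_eq_zero]
        intro a ha
        simp only [decide_eq_true_eq]
        rcases List.mem_cons.mp ha with rfl | hat
        · exact lt_irrefl a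
        · exact not_lt.mpr (hle a hat)
      rw [this]
    · have hmt : s ∈ t := by
        rcases List.mem_cons.mp hm with rfl | h' ; · exact absurd rfl hhs
        · exact h'
      rw [PySem.List.index?_cons_of_ne t hhs, ih hpt hmt]
      have hlt : h < s := lt_of_le_of_ne (hle s hmt) hhs
      have hd : h.toList < s.toList := String.lt_iff_toList_lt.mp hlt
      simp [hd, Nat.add_comm]

theorem compute_slot_spec : Claim_equal_compute_slot := by
  intro serial all_serials _
  unfold Spec_compute_slot compute_slot compute_slot_alt
  cases serial with
  | none => rfl
  | some s =>
    simp only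
    set fl := all_serials.filter (fun x => x ≠ "") with hfl
    have hperm : (PySem.List.sorted fl (fun x => x) false).Perm fl :=
      PySem.List.sorted_perm fl (fun x => x) false
    by_cases hmem : s = "" ∨ s ∉ all_serials
    · -- s not in the filtered list, so index? = none and both sides are 0
      have hnot : s ∉ PySem.List.sorted fl (fun x => x) false := by
        rw [hperm.mem_iff, hfl, List.mem_filter]
        rcases hmem with rfl | hns
        · rintro ⟨-, hne⟩; simp at hne
        · rintro ⟨hin, -⟩; exact hns hin
      rw [(PySem.List.index?_eq_none_iff _ _).mpr hnot]
      simp [hmem]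
    · push Not at hmem
      obtain ⟨hne, hin⟩ := hmem
      have hsm : s ∈ PySem.List.sorted fl (fun x => x) false := by
        rw [hperm.mem_iff, hfl, List.mem_filter]
        exact ⟨hin, by simpa using hne⟩
      have hp : (PySem.List.sorted fl (fun x => x) false).Pairwise (· ≤ ·) :=
        PySem.List.sorted_pairwise fl (fun x => x)
      rw [index?_sorted_eq_countP hp hsm, hperm.countP_eq]
      have hcount : fl.countP (fun x => decide (x < s))
          = all_serials.countP (fun x => decide (x ≠ "" ∧ x < s)) := by
        rw [hfl, List.countP_filter]
        congr 1
        funext x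
        by_cases hx : x = "" <;> simp [hx]
      rw [hcount]
      have := PySem.List.foldl_ite_add_one (fun x => x ≠ "" ∧ x < s) all_serials (0 : Int)
      simp only [this, hne, hin, not_true_eq_false, or_self, if_false, zero_add]

-- ===== VERDICT (by name: the statement is the Claim_ definition above) =====
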